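-- pv_equiv track=rewrite | github.com/earthai-tech/fusionlab-learn | fusionlab/tools/app/geoprior/ui/map/interpretation.py | _worst_sev
-- ===== SOURCE A (Python) =====
-- from typing import Any, Callable, Dict
-- from typing import Iterable, List, Optional
--
-- def _worst_sev(rows: List[Dict[str, Any]]) -> str:
--     order = {
--         "critical": 3,
--         "high": 2,
--         "medium": 1,
--         "low": 0,
--     }
--     best = "low"
--     best_s = -1
--     for r in rows or []:
--         s = str(r.get("sev", "low")).lower()
--         sc = order.get(s, -1)
--         if sc > best_s:
--             best_s = sc
--             best = s
--     return best
-- ===== SOURCE B (Python) =====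
-- def _worst_sev(rows):
--     present = {str(r.get("sev", "low")).lower() for r in rows or []}
--     for name in ("critical", "high", "medium", "low"):
--         if name in present:
--             return name
--     return "low"
-- ===== Notes on version B (the rewrite author's own statement) =====
-- stated objective: simpler
-- what changed: B precomputes the set of distinct lowered severity strings and returns the first name of the fixed priority tuple present in it, instead of scanning rows while tracking a running best score.
import Mathlib
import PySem

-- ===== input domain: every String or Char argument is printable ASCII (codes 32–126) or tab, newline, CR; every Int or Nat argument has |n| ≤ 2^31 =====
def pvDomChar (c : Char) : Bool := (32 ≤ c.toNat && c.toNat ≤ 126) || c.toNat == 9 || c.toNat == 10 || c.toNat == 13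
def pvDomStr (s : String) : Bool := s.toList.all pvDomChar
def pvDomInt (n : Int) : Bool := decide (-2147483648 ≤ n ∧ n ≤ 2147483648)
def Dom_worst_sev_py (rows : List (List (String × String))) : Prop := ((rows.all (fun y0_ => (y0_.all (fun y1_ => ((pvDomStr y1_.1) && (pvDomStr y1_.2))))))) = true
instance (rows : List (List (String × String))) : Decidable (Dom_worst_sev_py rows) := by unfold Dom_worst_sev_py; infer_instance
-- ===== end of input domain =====

-- B replaces A's running-max scan over rows by a precomputed set of the distinct
-- lowered severity strings, then returns the first name of the fixed priority
-- tuple present in that set (objective: simpler).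


-- ===== PORT A =====
-- str(r.get("sev","low")) applied to a string value is the identity, so it is dropped.
def worst_sev_py (rows : List (List (String × String))) : String :=
  let order : PySem.Dict String Int :=
    PySem.Dict.ofList [("critical", 3), ("high", 2), ("medium", 1), ("low", 0)]
  (rows.foldl
    (fun (st : String × Int) r =>
      let s := PySem.Str.lower (PySem.Dict.getD (PySem.Dict.mk r) "sev" "low")
      let sc := PySem.Dict.getD order s (-1)
      if sc > st.2 then (s, sc) else st)
    ("low", -1)).1

-- ===== PORT B =====
-- the for-loop over the literal 4-tuple ("critical","high","medium","low") is unrolled.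
def worst_sev_py_alt (rows : List (List (String × String))) : String :=
  let present : PySem.Set String :=
    PySem.Set.ofList (rows.map (fun r =>
      PySem.Str.lower (PySem.Dict.getD (PySem.Dict.mk r) "sev" "low")))
  if PySem.Set.contains present "critical" then "critical"
  else if PySem.Set.contains present "high" then "high"
  else if PySem.Set.contains present "medium" then "medium"
  else if PySem.Set.contains present "low" then "low"
  else "low"

-- ===== PRECONDITION & SPEC =====
def Spec_worst_sev_py (rows : List (List (String × String))) (out : String) : Prop := out = worst_sev_py_alt rows
instance (rows : List (List (String × String))) (out : String) : Decidable (Spec_worst_sev_py rows out) := by unfold Spec_worst_sev_py; infer_instance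

-- ===== CLAIM (what is proved, stated in full; the proofs are below) =====
def Claim_equal_worst_sev_py : Prop := ∀ (rows : List (List (String × String))), Dom_worst_sev_py rows → Spec_worst_sev_py rows (worst_sev_py rows)

-- ===== LEMMAS AND PROOFS =====

/-- the lowered severity string of a row -/
def pvSev (r : List (String × String)) : String :=
  PySem.Str.lower (PySem.Dict.getD (PySem.Dict.mk r) "sev" "low")

/-- the score A assigns to a severity string -/
def pvScore (s : String) : Int :=
  PySem.Dict.getD (PySem.Dict.ofList [("critical", 3), ("high", 2), ("medium", 1), ("low", 0)]) s (-1)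

/-- the severity name for a score (scores 0 and -1 both read "low") -/
def pvNm (sc : Int) : String :=
  if sc = 3 then "critical" else if sc = 2 then "high" else if sc = 1 then "medium" else "low"

/-- running maximum of the scores, A's `best_s` -/
def pvMaxSc (rows : List (List (String × String))) (bs : Int) : Int :=
  rows.foldl (fun m r => max m (pvScore (pvSev r))) bs

theorem pvScore_eq (s : String) :
    pvScore s = if s = "critical" then 3 else if s = "high" then 2
      else if s = "medium" then 1 else if s = "low" then 0 else -1 := by
  have h : (PySem.Dict.ofList [("critical", (3:Int)), ("high", 2), ("medium", 1), ("low", 0)])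
      = PySem.Dict.mk [("critical", 3), ("high", 2), ("medium", 1), ("low", 0)] := by decide
  simp only [pvScore, h, PySem.Dict.getD_eq_get?_getD, PySem.Dict.get?_mk_cons, beq_iff_eq]
  by_cases h1 : s = "critical" <;> by_cases h2 : s = "high" <;>
    by_cases h3 : s = "medium" <;> by_cases h4 : s = "low" <;>
      simp_all [eq_comm, PySem.Dict.get?]

theorem pvScore_vals (s : String) :
    pvScore s = -1 ∨ pvScore s = 0 ∨ pvScore s = 1 ∨ pvScore s = 2 ∨ pvScore s = 3 := by
  rw [pvScore_eq]; split_ifs <;> simp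

theorem pvNm_score (s : String) (h : 0 ≤ pvScore s) : pvNm (pvScore s) = s := by
  rw [pvScore_eq] at *
  split_ifs at * with h1 h2 h3 h4 <;> simp_all [pvNm]

theorem pvScore_eq_three (s : String) : pvScore s = 3 ↔ s = "critical" := by
  rw [pvScore_eq]; split_ifs <;> simp_all
theorem pvScore_eq_two (s : String) : pvScore s = 2 ↔ s = "high" := by
  rw [pvScore_eq]; split_ifs <;> simp_all
theorem pvScore_eq_one (s : String) : pvScore s = 1 ↔ s = "medium" := by
  rw [pvScore_eq]; split_ifs <;> simp_all

theorem pvMaxSc_cons (r : List (String × String)) (rows : List (List (String × String))) (bs : Int) :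
    pvMaxSc (r :: rows) bs = pvMaxSc rows (max bs (pvScore (pvSev r))) := rfl

theorem pvMaxSc_le (rows : List (List (String × String))) (bs k : Int)
    (hb : bs ≤ k) (h : ∀ r ∈ rows, pvScore (pvSev r) ≤ k) : pvMaxSc rows bs ≤ k := by
  induction rows generalizing bs with
  | nil => exact hb
  | cons r rows ih =>
    rw [pvMaxSc_cons]
    exact ih _ (max_le hb (h r (by simp))) (fun r' hr' => h r' (by simp [hr']))

theorem pvMaxSc_ge_iff (rows : List (List (String × String))) (bs k : Int) :
    k ≤ pvMaxSc rows bs ↔ k ≤ bs ∨ ∃ r ∈ rows, k ≤ pvScore (pvSev r) := by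
  induction rows generalizing bs with
  | nil => simp [pvMaxSc]
  | cons r rows ih =>
    rw [pvMaxSc_cons, ih, le_max_iff]
    constructor
    · rintro ((h | h) | ⟨r', hr', h⟩)
      · exact Or.inl h
      · exact Or.inr ⟨r, by simp, h⟩
      · exact Or.inr ⟨r', by simp [hr'], h⟩
    · rintro (h | ⟨r', hr', h⟩)
      · exact Or.inl (Or.inl h)
      · rcases List.mem_cons.1 hr' with he | he
        · exact Or.inl (Or.inr (he ▸ h))
        · exact Or.inr ⟨r', he, h⟩

/-- A's fold keeps `best = pvNm best_s`. -/
theorem pvA_fold (rows : List (List (String × String))) (bs : Int) (hb : -1 ≤ bs) :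
    rows.foldl
      (fun (st : String × Int) r =>
        let s := PySem.Str.lower (PySem.Dict.getD (PySem.Dict.mk r) "sev" "low")
        let sc := pvScore s
        if sc > st.2 then (s, sc) else st)
      (pvNm bs, bs)
    = (pvNm (pvMaxSc rows bs), pvMaxSc rows bs) := by
  induction rows generalizing bs with
  | nil => simp [pvMaxSc]
  | cons r rows ih =>
    rw [pvMaxSc_cons]
    simp only [List.foldl_cons]
    by_cases h : pvScore (pvSev r) > bs
    · have h0 : 0 ≤ pvScore (pvSev r) := by omega
      have hmx : max bs (pvScore (pvSev r)) = pvScore (pvSev r) := by omega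
      simp only [pvSev] at *
      rw [if_pos h, hmx]
      have := ih (pvScore (PySem.Str.lower (PySem.Dict.getD (PySem.Dict.mk r) "sev" "low"))) (by omega)
      rw [pvNm_score _ h0] at this
      exact this
    · have hmx : max bs (pvScore (pvSev r)) = bs := by omega
      simp only [pvSev] at *
      rw [if_neg h, hmx]
      exact ih bs hb

theorem pvA_eq (rows : List (List (String × String))) :
    worst_sev_py rows = pvNm (pvMaxSc rows (-1)) := by
  have h := pvA_fold rows (-1) (by omega)
  rw [show pvNm (-1) = "low" by decide] at h
  show (rows.foldl
      (fun (st : String × Int) r =>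
        let s := PySem.Str.lower (PySem.Dict.getD (PySem.Dict.mk r) "sev" "low")
        let sc := pvScore s
        if sc > st.2 then (s, sc) else st)
      ("low", -1)).1 = pvNm (pvMaxSc rows (-1))
  rw [h]

theorem pvB_contains (rows : List (List (String × String))) (name : String) :
    PySem.Set.contains
      (PySem.Set.ofList (rows.map (fun r =>
        PySem.Str.lower (PySem.Dict.getD (PySem.Dict.mk r) "sev" "low")))) name = true
    ↔ ∃ r ∈ rows, pvSev r = name := by
  rw [PySem.Set.contains_iff, PySem.Set.mem_ofList]
  simp [pvSev, eq_comm]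

theorem pvB_eq (rows : List (List (String × String))) :
    worst_sev_py_alt rows = pvNm (pvMaxSc rows (-1)) := by
  show (if PySem.Set.contains (PySem.Set.ofList (rows.map (fun r =>
          PySem.Str.lower (PySem.Dict.getD (PySem.Dict.mk r) "sev" "low")))) "critical" then "critical"
    else if PySem.Set.contains (PySem.Set.ofList (rows.map (fun r =>
          PySem.Str.lower (PySem.Dict.getD (PySem.Dict.mk r) "sev" "low")))) "high" then "high"
    else if PySem.Set.contains (PySem.Set.ofList (rows.map (fun r =>
          PySem.Str.lower (PySem.Dict.getD (PySem.Dict.mk r) "sev" "low")))) "medium" then "medium"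
    else if PySem.Set.contains (PySem.Set.ofList (rows.map (fun r =>
          PySem.Str.lower (PySem.Dict.getD (PySem.Dict.mk r) "sev" "low")))) "low" then "low"
    else "low") = pvNm (pvMaxSc rows (-1))
  set M := pvMaxSc rows (-1) with hM
  have hMle : M ≤ 3 := pvMaxSc_le rows (-1) 3 (by omega)
    (fun r _ => by rcases pvScore_vals (pvSev r) with h | h | h | h | h <;> omega)
  by_cases hc : ∃ r ∈ rows, pvSev r = "critical"
  · have h3 : (3 : Int) ≤ M := by
      rw [hM, pvMaxSc_ge_iff]
      obtain ⟨r, hr, he⟩ := hc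
      exact Or.inr ⟨r, hr, by rw [(pvScore_eq_three _).2 he]⟩
    have hMv : M = 3 := le_antisymm hMle h3
    rw [if_pos ((pvB_contains rows "critical").2 hc)]
    simp [pvNm, hMv]
  · have hle2 : M ≤ 2 := pvMaxSc_le rows (-1) 2 (by omega) (fun r hr => by
      rcases pvScore_vals (pvSev r) with h | h | h | h | h
      · omega
      · omega
      · omega
      · omega
      · exact absurd ⟨r, hr, (pvScore_eq_three _).1 h⟩ hc)
    rw [if_neg (fun h => hc ((pvB_contains rows "critical").1 h))]
    by_cases hh : ∃ r ∈ rows, pvSev r = "high"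
    · have h2 : (2 : Int) ≤ M := by
        rw [hM, pvMaxSc_ge_iff]
        obtain ⟨r, hr, he⟩ := hh
        exact Or.inr ⟨r, hr, by rw [(pvScore_eq_two _).2 he]⟩
      have hMv : M = 2 := le_antisymm hle2 h2
      rw [if_pos ((pvB_contains rows "high").2 hh)]
      simp [pvNm, hMv]
    · have hle1 : M ≤ 1 := pvMaxSc_le rows (-1) 1 (by omega) (fun r hr => by
        rcases pvScore_vals (pvSev r) with h | h | h | h | h
        · omega
        · omega
        · omega
        · exact absurd ⟨r, hr, (pvScore_eq_two _).1 h⟩ hh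
        · exact absurd ⟨r, hr, (pvScore_eq_three _).1 h⟩ hc)
      rw [if_neg (fun h => hh ((pvB_contains rows "high").1 h))]
      by_cases hm : ∃ r ∈ rows, pvSev r = "medium"
      · have h1 : (1 : Int) ≤ M := by
          rw [hM, pvMaxSc_ge_iff]
          obtain ⟨r, hr, he⟩ := hm
          exact Or.inr ⟨r, hr, by rw [(pvScore_eq_one _).2 he]⟩
        have hMv : M = 1 := le_antisymm hle1 h1
        rw [if_pos ((pvB_contains rows "medium").2 hm)]
        simp [pvNm, hMv]
      · have hle0 : M ≤ 0 := pvMaxSc_le rows (-1) 0 (by omega) (fun r hr => by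
          rcases pvScore_vals (pvSev r) with h | h | h | h | h
          · omega
          · omega
          · exact absurd ⟨r, hr, (pvScore_eq_one _).1 h⟩ hm
          · exact absurd ⟨r, hr, (pvScore_eq_two _).1 h⟩ hh
          · exact absurd ⟨r, hr, (pvScore_eq_three _).1 h⟩ hc)
        rw [if_neg (fun h => hm ((pvB_contains rows "medium").1 h))]
        have hnm : pvNm M = "low" := by
          simp only [pvNm]
          split_ifs <;> first | rfl | omega
        rw [← hnm]
        split_ifs <;> rfl

-- ===== VERDICT (by name: the statement is the Claim_ definition above) =====
theorem worst_sev_py_spec : Claim_equal_worst_sev_py := by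
  intro rows _
  unfold Spec_worst_sev_py
  rw [pvA_eq, pvB_eq]
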